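-- pv_equiv track=rewrite | github.com/grandwang/main_attack | attack/Utilities.py | splitSoluIntoNbyNRegions
-- ===== SOURCE A (Python) =====
-- def splitSoluIntoNbyNRegions(numofMethods, numberOfParticles, channels, k):
--     indArray = []
--     ind = 0
--     for i in range(numofMethods):
--         colArray = []
--         for j in range(numberOfParticles):
--             channelArray = []
--             for c in range(channels):
--                 channelArray.append(ind)
--                 ind = ind + 1
--             colArray.append(channelArray)
--         indArray.append(colArray)
--     chunks = []
--     for rows in range(0, numofMethods, k):
--         if rows + k > numofMethods:
--             r = indArray[rows:]
--         else:
--             r = indArray[rows:rows + k]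
--         if r:
--             for cols in range(0, numberOfParticles, k):
--                 chunks.append([])
--                 for rr in r:
--                     if cols + k > numberOfParticles:
--                         ch = [s for c in rr[cols:] for s in c]
--                     else:
--                         ch = [s for c in rr[cols:cols + k] for s in c]
--                     if ch:
--                         chunks[-1].extend(ch)
--     return chunks
-- ===== SOURCE B (Python) =====
-- def splitSoluIntoNbyNRegions(numofMethods, numberOfParticles, channels, k):
--     chunks = []
--     for rows in range(0, numofMethods, k):
--         for cols in range(0, numberOfParticles, k):
--             chunk = []
--             for i in range(rows, min(rows + k, numofMethods)):
--                 for j in range(cols, min(cols + k, numberOfParticles)):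
--                     for c in range(channels):
--                         chunk.append(i * numberOfParticles * channels + j * channels + c)
--             chunks.append(chunk)
--     return chunks
-- ===== Notes on version B (the rewrite author's own statement) =====
-- stated objective: simpler
-- what changed: B drops A's intermediate three-level index table and its slicing/regrouping pass entirely, generating each k-by-k block chunk directly from the arithmetic index formula i*numberOfParticles*channels + j*channels + c in one fused pass of block loops.
-- outside the precondition, e.g. on splitSoluIntoNbyNRegions(-2, -2, 1, -1): A returns [], B returns [[], [], [], []]
import Mathlib
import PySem

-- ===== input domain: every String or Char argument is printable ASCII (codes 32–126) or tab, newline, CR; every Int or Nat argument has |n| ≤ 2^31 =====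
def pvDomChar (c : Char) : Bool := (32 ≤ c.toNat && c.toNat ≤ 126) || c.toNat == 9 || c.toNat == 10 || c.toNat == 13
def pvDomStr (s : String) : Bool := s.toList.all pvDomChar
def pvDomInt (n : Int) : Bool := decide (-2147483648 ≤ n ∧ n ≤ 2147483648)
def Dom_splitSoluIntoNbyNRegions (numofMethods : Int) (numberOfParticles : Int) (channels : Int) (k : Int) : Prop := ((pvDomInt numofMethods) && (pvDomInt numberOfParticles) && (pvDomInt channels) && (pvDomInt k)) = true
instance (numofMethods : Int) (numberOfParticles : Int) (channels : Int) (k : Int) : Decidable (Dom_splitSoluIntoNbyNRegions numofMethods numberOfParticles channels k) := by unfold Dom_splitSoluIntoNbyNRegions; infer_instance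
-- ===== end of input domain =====

-- B fuses A's table-building and block-regrouping into one pass that emits each chunk's
-- indices directly from the formula i*numberOfParticles*channels + j*channels + c (objective: simpler).

-- ===== PORT A =====
-- A-side helper: phase 1 of A, building indArray with the running counter ind
def pvIndArray (numofMethods : Int) (numberOfParticles : Int) (channels : Int) : List (List (List Int)) :=
  ((PySem.List.pyRange 0 numofMethods 1).foldl
    (fun (s : List (List (List Int)) × Int) _i =>
      let col := (PySem.List.pyRange 0 numberOfParticles 1).foldl
        (fun (t : List (List Int) × Int) _j =>
          let ch := (PySem.List.pyRange 0 channels 1).foldl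
            (fun (u : List Int × Int) _c => (u.1 ++ [u.2], u.2 + 1)) ([], t.2)
          (t.1 ++ [ch.1], ch.2)) ([], s.2)
      (s.1 ++ [col.1], col.2)) ([], 0)).1

-- Python's 'chunks.append([])' followed by in-place 'chunks[-1].extend(ch)' is modelled by
-- accumulating the current chunk in 'cur' and appending it once the inner loop is done.
def splitSoluIntoNbyNRegions (numofMethods : Int) (numberOfParticles : Int) (channels : Int) (k : Int) : List (List Int) :=
  let indArray := pvIndArray numofMethods numberOfParticles channels
  (PySem.List.pyRange 0 numofMethods k).foldl (fun chunks rows =>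
    let r := if rows + k > numofMethods then PySem.List.slice indArray (some rows) none
             else PySem.List.slice indArray (some rows) (some (rows + k))
    if r ≠ [] then
      (PySem.List.pyRange 0 numberOfParticles k).foldl (fun chunks cols =>
        let cur := r.foldl (fun cur rr =>
          let ch := (if cols + k > numberOfParticles then PySem.List.slice rr (some cols) none
                     else PySem.List.slice rr (some cols) (some (cols + k))).flatten
          if ch ≠ [] then cur ++ ch else cur) []
        chunks ++ [cur]) chunks
    else chunks) []

-- ===== PORT B =====
def splitSoluIntoNbyNRegions_alt (numofMethods : Int) (numberOfParticles : Int) (channels : Int) (k : Int) : List (List Int) :=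
  (PySem.List.pyRange 0 numofMethods k).foldl (fun chunks rows =>
    (PySem.List.pyRange 0 numberOfParticles k).foldl (fun chunks cols =>
      let chunk := (PySem.List.pyRange rows (min (rows + k) numofMethods) 1).foldl (fun chunk i =>
        (PySem.List.pyRange cols (min (cols + k) numberOfParticles) 1).foldl (fun chunk j =>
          (PySem.List.pyRange 0 channels 1).foldl (fun chunk c =>
            chunk ++ [i * numberOfParticles * channels + j * channels + c]) chunk) chunk) []
      chunks ++ [chunk]) chunks) []

-- ===== PRECONDITION & SPEC =====
-- Pre_ requires k ≥ 1: k = 0 makes A raise ValueError (range() step must not be zero), and a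
-- negative block size k is outside the natural domain of this block-splitting routine (A's
-- results there are accidents of slicing an empty table, which B's arithmetic loops need not mimic).
def Pre_splitSoluIntoNbyNRegions (numofMethods : Int) (numberOfParticles : Int) (channels : Int) (k : Int) : Prop := 1 ≤ k
instance (numofMethods : Int) (numberOfParticles : Int) (channels : Int) (k : Int) : Decidable (Pre_splitSoluIntoNbyNRegions numofMethods numberOfParticles channels k) := by unfold Pre_splitSoluIntoNbyNRegions; infer_instance

def pvWitness_splitSoluIntoNbyNRegions : Int × Int × Int × Int := (4, 4, 3, 2)

def Spec_splitSoluIntoNbyNRegions (numofMethods : Int) (numberOfParticles : Int) (channels : Int) (k : Int) (out : List (List Int)) : Prop := out = splitSoluIntoNbyNRegions_alt numofMethods numberOfParticles channels k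
instance (numofMethods : Int) (numberOfParticles : Int) (channels : Int) (k : Int) (out : List (List Int)) : Decidable (Spec_splitSoluIntoNbyNRegions numofMethods numberOfParticles channels k out) := by unfold Spec_splitSoluIntoNbyNRegions; infer_instance

-- ===== CLAIM (what is proved, stated in full; the proofs are below) =====
def Claim_equal_splitSoluIntoNbyNRegions : Prop := ∀ (numofMethods : Int) (numberOfParticles : Int) (channels : Int) (k : Int), Dom_splitSoluIntoNbyNRegions numofMethods numberOfParticles channels k → Pre_splitSoluIntoNbyNRegions numofMethods numberOfParticles channels k → Spec_splitSoluIntoNbyNRegions numofMethods numberOfParticles channels k (splitSoluIntoNbyNRegions numofMethods numberOfParticles channels k)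

-- ===== LEMMAS AND PROOFS =====

-- the common value both programs compute, written over Int ranges
def cellF (P C i j : Int) : List Int := (PySem.List.pyRange 0 C 1).map (fun c => i * P * C + j * C + c)
def rowF (P C i : Int) : List (List Int) := (PySem.List.pyRange 0 P 1).map (fun j => cellF P C i j)
def chunkF (M P C k rows cols : Int) : List Int :=
  (PySem.List.pyRange rows (min (rows + k) M) 1).flatMap (fun i =>
    (PySem.List.pyRange cols (min (cols + k) P) 1).flatMap (fun j => cellF P C i j))

def chanL (ind : Int) (n : Nat) : List Int := (List.range n).map (fun (t : Nat) => ind + (t : Int))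

theorem append_guard {α : Type} (cur ch : List α) : (if ch ≠ [] then cur ++ ch else cur) = cur ++ ch := by
  by_cases h : ch = [] <;> simp [h]

theorem chan_loop (l : List Int) (ca : List Int) (ind : Int) :
    l.foldl (fun (u : List Int × Int) _ => (u.1 ++ [u.2], u.2 + 1)) (ca, ind)
      = (ca ++ chanL ind l.length, ind + (l.length : Int)) := by
  induction l generalizing ca ind with
  | nil => simp [chanL]
  | cons x xs ih =>
    simp only [List.foldl_cons, ih, List.length_cons]
    simp only [Prod.mk.injEq]
    constructor
    · simp only [chanL, List.range_succ_eq_map, List.map_cons, List.map_map, Nat.cast_zero,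
        add_zero, List.append_assoc, List.singleton_append]
      refine congrArg (ca ++ ·) (congrArg (ind :: ·) (List.map_congr_left ?_))
      intro t _
      simp only [Function.comp_apply, Nat.succ_eq_add_one]
      push_cast
      ring
    · push_cast
      ring

theorem col_loop (Cn : Nat) (l : List Int) (acc : List (List Int)) (ind : Int) :
    l.foldl (fun (t : List (List Int) × Int) _ => (t.1 ++ [chanL t.2 Cn], t.2 + (Cn : Int))) (acc, ind)
      = (acc ++ (List.range l.length).map (fun (j : Nat) => chanL (ind + (j : Int) * (Cn : Int)) Cn),
         ind + (l.length : Int) * (Cn : Int)) := by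
  induction l generalizing acc ind with
  | nil => simp
  | cons x xs ih =>
    simp only [List.foldl_cons, ih, List.length_cons]
    simp only [Prod.mk.injEq]
    constructor
    · simp only [List.range_succ_eq_map, List.map_cons, List.map_map, Nat.cast_zero, zero_mul,
        add_zero, List.append_assoc, List.singleton_append]
      refine congrArg (acc ++ ·) (congrArg (chanL ind Cn :: ·) (List.map_congr_left ?_))
      intro t _
      simp only [Function.comp_apply, Nat.succ_eq_add_one]
      congr 1
      push_cast
      ring
    · push_cast
      ring

theorem tab_loop (Pn Cn : Nat) (l : List Int) (acc : List (List (List Int))) (ind : Int) :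
    l.foldl (fun (s : List (List (List Int)) × Int) _ =>
        (s.1 ++ [(List.range Pn).map (fun (j : Nat) => chanL (s.2 + (j : Int) * (Cn : Int)) Cn)],
         s.2 + (Pn : Int) * (Cn : Int))) (acc, ind)
      = (acc ++ (List.range l.length).map (fun (i : Nat) =>
            (List.range Pn).map (fun (j : Nat) =>
              chanL (ind + (i : Int) * ((Pn : Int) * (Cn : Int)) + (j : Int) * (Cn : Int)) Cn)),
         ind + (l.length : Int) * ((Pn : Int) * (Cn : Int))) := by
  induction l generalizing acc ind with
  | nil => simp
  | cons x xs ih =>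
    simp only [List.foldl_cons, ih, List.length_cons]
    simp only [Prod.mk.injEq]
    constructor
    · simp only [List.range_succ_eq_map, List.map_cons, List.map_map, Nat.cast_zero, zero_mul,
        add_zero, List.append_assoc, List.singleton_append]
      refine congrArg (acc ++ ·) (congrArg (_ :: ·) (List.map_congr_left ?_))
      intro t _
      simp only [Function.comp_apply, Nat.succ_eq_add_one]
      refine List.map_congr_left ?_
      intro j _
      congr 1
      push_cast
      ring
    · push_cast
      ring

theorem table_eq (M P C : Int) :
    pvIndArray M P C = (PySem.List.pyRange 0 M 1).map (rowF P C) := by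
  unfold pvIndArray
  rw [PySem.List.foldl_congr_mem _ _
      (fun (s : List (List (List Int)) × Int) (_ : Int) =>
        (s.1 ++ [(List.range (PySem.List.pyRange 0 P 1).length).map
            (fun (j : Nat) => chanL (s.2 + (j : Int) * ((PySem.List.pyRange 0 C 1).length : Int))
              (PySem.List.pyRange 0 C 1).length)],
         s.2 + ((PySem.List.pyRange 0 P 1).length : Int) * ((PySem.List.pyRange 0 C 1).length : Int)))
      _ ?_]
  · rw [tab_loop]
    simp only [List.nil_append]
    simp only [PySem.List.length_pyRange_one, sub_zero]
    simp only [PySem.List.pyRange_one, sub_zero, List.map_map]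
    refine List.map_congr_left ?_
    intro i _
    simp only [Function.comp_apply, rowF, cellF, PySem.List.pyRange_one, sub_zero, List.map_map,
      zero_add]
    refine List.map_congr_left ?_
    intro j hj
    have hP : ((P.toNat : Int)) = P := by
      have := List.mem_range.mp hj
      omega
    simp only [chanL]
    refine List.map_congr_left ?_
    intro c hc
    have hC : ((C.toNat : Int)) = C := by
      have := List.mem_range.mp hc
      omega
    rw [hP, hC]
    simp only [Function.comp_apply]
    ring
  · intro s x _
    simp only [chan_loop, List.nil_append]
    rw [col_loop]
    simp only [List.nil_append]

theorem drop_map_pyRange {α : Type} (f : Int → α) (M a : Int) (h0 : 0 ≤ a) (h1 : a ≤ M) :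
    ((PySem.List.pyRange 0 M 1).map f).drop a.toNat = (PySem.List.pyRange a M 1).map f := by
  rw [PySem.List.pyRange_one_append 0 a M h0 h1, List.map_append]
  have h : a.toNat = ((PySem.List.pyRange 0 a 1).map f).length := by
    simp [PySem.List.length_pyRange_one]
  rw [h, List.drop_left]

theorem take_map_pyRange {α : Type} (f : Int → α) (a b M : Int) (h0 : a ≤ b) (h1 : b ≤ M) :
    ((PySem.List.pyRange a M 1).map f).take (b - a).toNat = (PySem.List.pyRange a b 1).map f := by
  rw [PySem.List.pyRange_one_append a b M h0 h1, List.map_append]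
  have h : (b - a).toNat = ((PySem.List.pyRange a b 1).map f).length := by
    simp [PySem.List.length_pyRange_one]
  rw [h, List.take_left]

-- Python r = indArray[rows:rows+k] / indArray[rows:], as a range map
theorem slice_map_pyRange {α : Type} (f : Int → α) (M a k : Int) (h0 : 0 ≤ a) (h1 : a < M) (hk : 1 ≤ k) :
    (if a + k > M then PySem.List.slice ((PySem.List.pyRange 0 M 1).map f) (some a) none
     else PySem.List.slice ((PySem.List.pyRange 0 M 1).map f) (some a) (some (a + k)))
    = (PySem.List.pyRange a (min (a + k) M) 1).map f := by
  by_cases hcase : a + k > M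
  · rw [if_pos hcase, PySem.List.slice_from _ h0, drop_map_pyRange f M a h0 (le_of_lt h1)]
    rw [min_eq_right (by omega)]
  · rw [if_neg hcase, PySem.List.slice_toNat _ h0 (by omega)]
    have hn : (a + k).toNat - a.toNat = ((a + k) - a).toNat := by omega
    rw [hn, drop_map_pyRange f M a h0 (le_of_lt h1),
      take_map_pyRange f a (a + k) M (by omega) (by omega)]
    rw [min_eq_left (by omega)]

theorem chunkA_eq (M P C k rows cols : Int) (hc0 : 0 ≤ cols) (hcP : cols < P) (hk : 1 ≤ k) :
    ((PySem.List.pyRange rows (min (rows + k) M) 1).map (rowF P C)).foldl (fun cur rr =>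
        let ch := (if cols + k > P then PySem.List.slice rr (some cols) none
                   else PySem.List.slice rr (some cols) (some (cols + k))).flatten
        if ch ≠ [] then cur ++ ch else cur) []
      = chunkF M P C k rows cols := by
  simp only [append_guard]
  simp only [PySem.List.foldl_append_eq_flatMap, List.nil_append, List.flatMap_map]
  simp only [rowF]
  have hs : ∀ i : Int,
      (if cols + k > P then
        PySem.List.slice ((PySem.List.pyRange 0 P 1).map (fun j => cellF P C i j)) (some cols) none
       else PySem.List.slice ((PySem.List.pyRange 0 P 1).map (fun j => cellF P C i j)) (some cols)
        (some (cols + k)))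
      = (PySem.List.pyRange cols (min (cols + k) P) 1).map (fun j => cellF P C i j) :=
    fun i => slice_map_pyRange (fun j => cellF P C i j) P cols k hc0 hcP hk
  simp only [hs]
  simp only [← List.flatMap_def, chunkF]

theorem chunkB_eq (M P C k rows cols : Int) :
    (PySem.List.pyRange rows (min (rows + k) M) 1).foldl (fun chunk i =>
        (PySem.List.pyRange cols (min (cols + k) P) 1).foldl (fun chunk j =>
          (PySem.List.pyRange 0 C 1).foldl (fun chunk c =>
            chunk ++ [i * P * C + j * C + c]) chunk) chunk) []
      = chunkF M P C k rows cols := by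
  simp only [PySem.List.foldl_append_singleton_eq_map, PySem.List.foldl_append_eq_flatMap,
    List.nil_append, chunkF, cellF]

-- ===== VERDICT (by name: the statement is the Claim_ definition above) =====
theorem splitSoluIntoNbyNRegions_spec : Claim_equal_splitSoluIntoNbyNRegions := by
  intro M P C k _hdom hkpre
  have hk : (1 : Int) ≤ k := hkpre
  have hk0 : (0 : Int) < k := by omega
  unfold Spec_splitSoluIntoNbyNRegions splitSoluIntoNbyNRegions splitSoluIntoNbyNRegions_alt
  simp only [table_eq]
  refine PySem.List.foldl_congr_mem _ _ _ _ ?_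
  intro chunks rows hrmem
  obtain ⟨hr0, hrM, -⟩ := (PySem.List.mem_pyRange_iff_of_pos hk0 rows).1 hrmem
  simp only [slice_map_pyRange (rowF P C) M rows k hr0 hrM hk]
  have hne : ((PySem.List.pyRange rows (min (rows + k) M) 1).map (rowF P C)) ≠ [] := by
    rw [PySem.List.pyRange_one_cons (show rows < min (rows + k) M by omega)]
    simp
  rw [if_pos hne]
  refine PySem.List.foldl_congr_mem _ _ _ _ ?_
  intro chunks2 cols hcmem
  obtain ⟨hc0, hcP, -⟩ := (PySem.List.mem_pyRange_iff_of_pos hk0 cols).1 hcmem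
  simp only [chunkA_eq M P C k rows cols hc0 hcP hk, chunkB_eq M P C k rows cols]
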